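-- pv_equiv track=rewrite | github.com/mymusise/Django-Rest-API-Template | src/common/util/crypt.py | basex_decode
-- ===== SOURCE A (Python) =====
-- EASY_IDENTIFIED_ALPHABET = "23456789ABCDEFGHJKLMNPQRSTUVWXYZabcdefghijkmnpqrstuvwxyz"
--
-- def basex_decode(string, alphabet=EASY_IDENTIFIED_ALPHABET):
--     """Decode a Base X encoded string into the number
--
--     Arguments:
--     - `string`: The encoded string
--     - `alphabet`: The alphabet to use for encoding
--     """
--     base = len(alphabet)
--     strlen = len(string)
--     num = 0
--
--     idx = 0
--     for char in string:
--         power = strlen - (idx + 1)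
--         num += alphabet.index(char) * (base ** power)
--         idx += 1
--
--     return num
-- ===== SOURCE B (Python) =====
-- EASY_IDENTIFIED_ALPHABET = "23456789ABCDEFGHJKLMNPQRSTUVWXYZabcdefghijkmnpqrstuvwxyz"
--
-- def basex_decode(string, alphabet=EASY_IDENTIFIED_ALPHABET):
--     """Decode a Base X encoded string into the number (Horner's method)."""
--     base = len(alphabet)
--     num = 0
--     for char in string:
--         num = num * base + alphabet.index(char)
--     return num
-- ===== Notes on version B (the rewrite author's own statement) =====
-- stated objective: faster
-- what changed: Replaces the per-position power computation (idx counter, power = strlen-(idx+1), base**power exponentiation) by Horner's recurrence num = num*base + alphabet.index(char), a single accumulator with no exponentiation.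
import Mathlib
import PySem

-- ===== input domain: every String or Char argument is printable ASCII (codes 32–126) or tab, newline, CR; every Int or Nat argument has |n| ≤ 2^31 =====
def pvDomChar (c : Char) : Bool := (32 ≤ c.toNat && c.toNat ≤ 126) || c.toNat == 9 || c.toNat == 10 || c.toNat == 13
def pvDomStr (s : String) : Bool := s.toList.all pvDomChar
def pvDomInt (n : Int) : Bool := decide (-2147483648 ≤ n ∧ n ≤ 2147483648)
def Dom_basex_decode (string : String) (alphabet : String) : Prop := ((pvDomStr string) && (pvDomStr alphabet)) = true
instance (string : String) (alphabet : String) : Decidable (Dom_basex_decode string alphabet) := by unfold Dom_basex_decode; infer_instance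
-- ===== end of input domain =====

-- B replaces A's per-position power computation (idx counter, base ** power) by
-- Horner's recurrence num = num*base + alphabet.index(char); timing run measured B faster.


-- ===== PORT A =====
-- alphabet.index(char): Pre_ guarantees membership, so index? is some; getD 0 is never the default.
def pvDigit (alphabet : String) (c : Char) : Int :=
  ((PySem.List.index? alphabet.toList c).getD 0 : Nat)

-- A's loop body: state (num, idx); power = strlen - (idx + 1)
def pvStepA (alphabet : String) (strlen : Nat) (st : Int × Nat) (c : Char) : Int × Nat :=
  (st.1 + pvDigit alphabet c * (PySem.Str.len alphabet : Int) ^ (strlen - (st.2 + 1)), st.2 + 1)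

def basex_decode (string : String) (alphabet : String) : Int :=
  let strlen := string.toList.length
  (string.toList.foldl (pvStepA alphabet strlen) (0, 0)).1

-- ===== PORT B =====
-- Horner: num = num * base + alphabet.index(char)
def pvStepB (alphabet : String) (num : Int) (c : Char) : Int :=
  num * (PySem.Str.len alphabet : Int) + pvDigit alphabet c

def basex_decode_alt (string : String) (alphabet : String) : Int :=
  string.toList.foldl (pvStepB alphabet) 0

-- ===== PRECONDITION & SPEC =====
-- Pre_ excludes exactly the inputs on which Python's alphabet.index(char) raises ValueError.
def Pre_basex_decode (string : String) (alphabet : String) : Prop :=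
  (string.toList.all (fun c => alphabet.toList.contains c)) = true
instance (string : String) (alphabet : String) : Decidable (Pre_basex_decode string alphabet) := by
  unfold Pre_basex_decode; infer_instance

def pvWitness_basex_decode : String × String := ("ba", "abc")

def Spec_basex_decode (string : String) (alphabet : String) (out : Int) : Prop := out = basex_decode_alt string alphabet
instance (string : String) (alphabet : String) (out : Int) : Decidable (Spec_basex_decode string alphabet out) := by unfold Spec_basex_decode; infer_instance

-- ===== CLAIM (what is proved, stated in full; the proofs are below) =====
def Claim_equal_basex_decode : Prop := ∀ (string : String) (alphabet : String), Dom_basex_decode string alphabet → Pre_basex_decode string alphabet → Spec_basex_decode string alphabet (basex_decode string alphabet)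

-- ===== LEMMAS AND PROOFS =====

-- the positional value both loops compute, defined structurally
def pvVal (alphabet : String) : List Char → Int
  | [] => 0
  | c :: t => pvDigit alphabet c * (PySem.Str.len alphabet : Int) ^ t.length + pvVal alphabet t

theorem pvFoldA (alphabet : String) (strlen : Nat) :
    ∀ (l : List Char) (n : Int) (idx : Nat), strlen = idx + l.length →
      (l.foldl (pvStepA alphabet strlen) (n, idx)).1 = n + pvVal alphabet l := by
  intro l
  induction l with
  | nil => intro n idx _; simp [pvVal]
  | cons c t ih =>
    intro n idx h
    have hp : strlen - (idx + 1) = t.length := by simp at h; omega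
    simp only [List.foldl_cons, pvStepA, hp]
    rw [ih _ (idx + 1) (by simp at h ⊢; omega)]
    simp [pvVal]; ring

theorem pvFoldB (alphabet : String) :
    ∀ (l : List Char) (m : Int),
      l.foldl (pvStepB alphabet) m = m * (PySem.Str.len alphabet : Int) ^ l.length + pvVal alphabet l := by
  intro l
  induction l with
  | nil => intro m; simp [pvVal]
  | cons c t ih =>
    intro m
    simp only [List.foldl_cons, pvStepB, ih, pvVal, List.length_cons]
    ring

-- ===== VERDICT (by name: the statement is the Claim_ definition above) =====
theorem basex_decode_spec : Claim_equal_basex_decode := by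
  intro s a _ _
  unfold Spec_basex_decode basex_decode basex_decode_alt
  rw [pvFoldA a s.toList.length s.toList 0 0 (by simp), pvFoldB]
  simp
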